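-- pv_equiv track=rewrite | github.com/lucasguerra91/hello-wolrd | Parcialitos/Primero/lista_de_comunes.py | listar_comunes
-- ===== SOURCE A (Python) =====
-- def listar_comunes(lista1, lista2):
--
--     nueva_lista = []
--
--     if len(lista1) * len(lista2) == 0:
--         return nueva_lista
--
--     for i in range(len(lista1)):
--         if lista1[i] in lista2:
--             if lista1[i] not in nueva_lista:
--                 nueva_lista.append(lista1[i])
--
--     return nueva_lista
-- ===== SOURCE B (Python) =====
-- def listar_comunes(lista1, lista2):
--     # Worklist dedup: take the head, then delete ALL its remaining copies from the
--     # worklist before continuing, so no "seen so far" membership test is needed.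
--     primeras = []
--     resto = lista1
--     while resto:
--         cabeza = resto[0]
--         primeras.append(cabeza)
--         resto = [y for y in resto[1:] if y != cabeza]
--     return [x for x in primeras if x in lista2]
-- ===== Notes on version B (the rewrite author's own statement) =====
-- stated objective: alternative
-- what changed: Replaces A's single interleaved loop with a 'seen so far' membership check (and an empty-product guard) by a worklist algorithm: repeatedly take the head and erase all its remaining duplicates from the worklist, then filter the resulting first-occurrence list by membership in lista2; no guard and no seen-list lookup remain.
import Mathlib
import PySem

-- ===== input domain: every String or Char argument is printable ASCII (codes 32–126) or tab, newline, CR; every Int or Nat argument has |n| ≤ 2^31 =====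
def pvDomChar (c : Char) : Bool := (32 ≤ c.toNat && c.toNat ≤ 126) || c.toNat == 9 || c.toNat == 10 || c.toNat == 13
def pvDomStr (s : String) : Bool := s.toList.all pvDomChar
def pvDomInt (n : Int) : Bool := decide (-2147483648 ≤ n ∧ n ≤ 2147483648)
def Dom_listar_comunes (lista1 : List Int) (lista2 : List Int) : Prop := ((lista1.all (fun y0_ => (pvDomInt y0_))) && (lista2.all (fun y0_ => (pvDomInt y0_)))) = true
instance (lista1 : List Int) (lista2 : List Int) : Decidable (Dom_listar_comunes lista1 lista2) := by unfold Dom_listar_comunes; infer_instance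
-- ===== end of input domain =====

-- B replaces A's interleaved loop (seen-list lookup plus empty-product guard) by a worklist
-- algorithm: take the head, erase its remaining duplicates, repeat; then filter by lista2.

-- ===== PORT A =====
def listar_comunes (lista1 : List Int) (lista2 : List Int) : List Int :=
  let nueva_lista : List Int := []
  if lista1.length * lista2.length = 0 then nueva_lista
  else
    lista1.foldl (fun acc x =>
      if lista2.contains x then
        (if acc.contains x then acc else acc ++ [x])
      else acc) nueva_lista

-- ===== PORT B =====
-- the while loop of Source B: state (primeras, resto); terminates because the worklist shrinks
def pvPrimerasLoop (primeras : List Int) (resto : List Int) : List Int :=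
  match resto with
  | [] => primeras
  | cabeza :: t =>
      pvPrimerasLoop (primeras ++ [cabeza]) (t.filter (fun y => y ≠ cabeza))
termination_by resto.length
decreasing_by
  simp only [List.length_unattach]
  exact Nat.lt_succ_of_le ((List.length_filter_le _ _).trans (le_of_eq List.length_attach))

def listar_comunes_alt (lista1 : List Int) (lista2 : List Int) : List Int :=
  (pvPrimerasLoop [] lista1).filter (fun x => lista2.contains x)

-- ===== PRECONDITION & SPEC =====
def Spec_listar_comunes (lista1 : List Int) (lista2 : List Int) (out : List Int) : Prop := out = listar_comunes_alt lista1 lista2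
instance (lista1 : List Int) (lista2 : List Int) (out : List Int) : Decidable (Spec_listar_comunes lista1 lista2 out) := by unfold Spec_listar_comunes; infer_instance

-- ===== CLAIM (what is proved, stated in full; the proofs are below) =====
def Claim_equal_listar_comunes : Prop := ∀ (lista1 : List Int) (lista2 : List Int), Dom_listar_comunes lista1 lista2 → Spec_listar_comunes lista1 lista2 (listar_comunes lista1 lista2)

-- ===== LEMMAS AND PROOFS =====

-- the worklist loop only ever appends to its accumulator
lemma pvPrimerasLoop_acc : ∀ (n : Nat) (r : List Int), r.length ≤ n →
    ∀ p, pvPrimerasLoop p r = p ++ pvPrimerasLoop [] r := by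
  intro n
  induction n with
  | zero =>
    intro r hr p
    have : r = [] := List.length_eq_zero_iff.mp (Nat.le_zero.mp hr)
    simp [this, pvPrimerasLoop]
  | succ n ih =>
    intro r hr p
    match r with
    | [] => simp [pvPrimerasLoop]
    | cabeza :: t =>
      have hlen : (t.filter (fun y => y ≠ cabeza)).length ≤ n := by
        have := List.length_filter_le (fun y => decide (y ≠ cabeza)) t
        simp at hr; omega
      rw [pvPrimerasLoop, pvPrimerasLoop, ih _ hlen, ih _ hlen []]
      simp
      exact (ih _ (by simpa using hlen) [cabeza]).symm

-- A's dedup accumulator, run on the part of the list not yet in the accumulator,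
-- is the worklist loop's output
lemma foldl_eq_worklist :
    ∀ (l u : List Int),
      l.foldl (fun acc x => if acc.contains x then acc else acc ++ [x]) u
      = u ++ pvPrimerasLoop [] (l.filter (fun y => !u.contains y)) := by
  intro l
  induction l with
  | nil => intro u; simp [pvPrimerasLoop]
  | cons x t ih =>
    intro u
    simp only [List.foldl_cons, List.filter_cons]
    by_cases hu : x ∈ u
    · simpa [hu] using ih u
    · have h2 : (t.filter (fun y => !u.contains y)).filter (fun y => y ≠ x)
          = t.filter (fun y => !(u ++ [x]).contains y) := by
        rw [List.filter_filter]
        apply List.filter_congr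
        intro y _
        by_cases hy : y = x <;> by_cases hyu : y ∈ u <;> simp [hy, hyu]
      rw [if_neg (by simpa using hu), ih (u ++ [x])]
      rw [if_pos (by simpa using hu)]
      rw [pvPrimerasLoop, pvPrimerasLoop_acc _ _ le_rfl, h2]
      simp
      exact (pvPrimerasLoop_acc _ _ le_rfl [x]).symm

-- pulling the lista2 filter out of A's interleaved loop
lemma foldl_filter_inv (lista2 : List Int) :
    ∀ (l : List Int) (u : List Int),
      l.foldl (fun acc x =>
          if lista2.contains x then
            (if acc.contains x then acc else acc ++ [x])
          else acc) (u.filter (fun x => lista2.contains x))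
      = (l.foldl (fun acc x => if acc.contains x then acc else acc ++ [x]) u).filter
          (fun x => lista2.contains x) := by
  intro l
  induction l with
  | nil => intro u; rfl
  | cons x l ih =>
    intro u
    simp only [List.foldl_cons]
    by_cases hp : x ∈ lista2 <;> by_cases hu : x ∈ u
    · simpa [hp, hu] using ih u
    · simpa [hp, hu, List.filter_append] using ih (u ++ [x])
    · simpa [hp, hu] using ih u
    · simpa [hp, hu, List.filter_append] using ih (u ++ [x])

-- ===== VERDICT (by name: the statement is the Claim_ definition above) =====
theorem listar_comunes_spec : Claim_equal_listar_comunes := by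
  intro lista1 lista2 _
  unfold Spec_listar_comunes listar_comunes listar_comunes_alt
  by_cases hg : lista1.length * lista2.length = 0
  · rcases Nat.mul_eq_zero.mp hg with h | h
    · have : lista1 = [] := List.length_eq_zero_iff.mp h
      simp [this, pvPrimerasLoop]
    · have : lista2 = [] := List.length_eq_zero_iff.mp h
      simp [this]
  · have h1 := foldl_filter_inv lista2 lista1 []
    have h2 := foldl_eq_worklist lista1 []
    simp only [List.filter_nil] at h1
    rw [if_neg hg, h1, h2]
    simp
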